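-- pv_equiv track=rewrite | github.com/ShaniStaretz-ai/python-basic-lec21-Dec-01-24 | python-basic-final-work2.py | duplicate_strings
-- ===== SOURCE A (Python) =====
-- def build_dict_for_string_list(l1: list[str])->dict[str, int]:
--     dic1: dict[str, int] = {}
--
--     i:int = 0
--     while i < len(l1):
--         x = l1[i]
--         if dic1.get(x):
--             dic1[x] += 1
--         else:
--             dic1[x] = 1
--         i += 1
--     return dic1
--
-- def duplicate_strings(l1: list[str])->list[str]:
--     dic1: dict[str, int] = build_dict_for_string_list(l1)
--     result:list[str] = []
--     i:int = 0
--     keys:list[str] = list(dic1.keys())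
--     while i < len(keys):
--         k = keys[i]
--         if dic1.get(k) > 1:
--             result.append(k)
--         i += 1
--     return result
-- ===== SOURCE B (Python) =====
-- def duplicate_strings(l1: list[str]) -> list[str]:
--     seen: set[str] = set()
--     dups: set[str] = set()
--     for x in l1:
--         if x in seen:
--             dups.add(x)
--         else:
--             seen.add(x)
--     result: list[str] = []
--     added: set[str] = set()
--     for x in l1:
--         if x in dups and x not in added:
--             result.append(x)
--             added.add(x)
--     return result
-- ===== Notes on version B (the rewrite author's own statement) =====
-- stated objective: idiomatic
-- what changed: Replaces the index-loop count dictionary plus a second index loop over its keys with two for-loops over the list maintaining seen/dups membership sets, then emitting first occurrences of duplicated strings directly from the original list.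
import Mathlib
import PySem

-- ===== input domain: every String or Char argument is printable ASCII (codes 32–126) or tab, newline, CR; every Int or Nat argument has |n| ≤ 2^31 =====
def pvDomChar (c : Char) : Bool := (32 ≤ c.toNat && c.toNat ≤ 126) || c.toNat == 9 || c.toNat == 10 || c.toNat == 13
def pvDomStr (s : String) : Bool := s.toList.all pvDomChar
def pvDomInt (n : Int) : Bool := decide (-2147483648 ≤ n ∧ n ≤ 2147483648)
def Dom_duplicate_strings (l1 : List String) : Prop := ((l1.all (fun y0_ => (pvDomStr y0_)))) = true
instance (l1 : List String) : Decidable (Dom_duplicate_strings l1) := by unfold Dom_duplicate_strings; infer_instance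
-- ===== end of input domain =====

-- Header: B replaces A's count-dictionary + key scan by two passes over the list with
-- seen/dups membership sets (idiomatic, same O(n) cost); proved to return A's exact value.


-- ===== PORT A =====
-- A's 'while i < len(l1)' index loop, transcribed as structural recursion over the list
-- (same traversal order, same dict state); 'if dic1.get(x):' is truthiness of Optional[int]
-- (None and 0 are falsy), i.e. (d.get? x).getD 0 ≠ 0.
def pvBuildLoop : List String → PySem.Dict String Int → PySem.Dict String Int
  | [], d => d
  | x :: rest, d =>
      if ((d.get? x).getD 0) ≠ 0 then
        pvBuildLoop rest (d.insert x (d.getD x 0 + 1))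
      else
        pvBuildLoop rest (d.insert x 1)

def build_dict_for_string_list (l1 : List String) : PySem.Dict String Int :=
  pvBuildLoop l1 PySem.Dict.empty

-- second while loop over keys; every k in keys is present in dic1, so dic1.get(k) is its
-- value and 'dic1.get(k) > 1' is exactly d.getD k 0 > 1
def pvKeyLoop (d : PySem.Dict String Int) : List String → List String → List String
  | [], res => res
  | k :: ks, res => pvKeyLoop d ks (if d.getD k 0 > 1 then res ++ [k] else res)

def duplicate_strings (l1 : List String) : List String :=
  let dic1 := build_dict_for_string_list l1
  pvKeyLoop dic1 dic1.keys []

-- ===== PORT B =====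
def pvPass1 : List String → PySem.Set String × PySem.Set String → PySem.Set String × PySem.Set String
  | [], sd => sd
  | x :: rest, (seen, dups) =>
      if seen.contains x then pvPass1 rest (seen, dups.add x)
      else pvPass1 rest (seen.add x, dups)

def pvPass2 (dups : PySem.Set String) : List String → List String × PySem.Set String → List String × PySem.Set String
  | [], ra => ra
  | x :: rest, (res, added) =>
      if dups.contains x && !(added.contains x) then
        pvPass2 dups rest (res ++ [x], added.add x)
      else
        pvPass2 dups rest (res, added)

def duplicate_strings_alt (l1 : List String) : List String :=
  let dups := (pvPass1 l1 (PySem.Set.empty, PySem.Set.empty)).2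
  (pvPass2 dups l1 ([], PySem.Set.empty)).1

-- ===== PRECONDITION & SPEC =====
def Spec_duplicate_strings (l1 : List String) (out : List String) : Prop := out = duplicate_strings_alt l1
instance (l1 : List String) (out : List String) : Decidable (Spec_duplicate_strings l1 out) := by unfold Spec_duplicate_strings; infer_instance

-- ===== CLAIM (what is proved, stated in full; the proofs are below) =====
def Claim_equal_duplicate_strings : Prop := ∀ (l1 : List String), Dom_duplicate_strings l1 → Spec_duplicate_strings l1 (duplicate_strings l1)

-- ===== LEMMAS AND PROOFS =====

-- keep-first dedup with an exclusion set, the common shape of both sides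
def pvG : List String → List String → List String
  | [], _ => []
  | x :: xs, a => if a.contains x then pvG xs a else x :: pvG xs (a ++ [x])

theorem pvBuildLoop_eq (l : List String) : ∀ d,
    pvBuildLoop l d = l.foldl (fun d x => d.insert x (d.getD x 0 + 1)) d := by
  induction l with
  | nil => intro d; rfl
  | cons x rest ih =>
      intro d
      by_cases h : ((d.get? x).getD 0) ≠ 0
      · simp [pvBuildLoop, h, ih]
      · have h0 : d.getD x 0 = 0 := by
          rw [PySem.Dict.getD_eq_get?_getD]; omega
        simp [pvBuildLoop, h, ih, h0]

theorem pvKeyLoop_eq (d : PySem.Dict String Int) (ks : List String) : ∀ res,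
    pvKeyLoop d ks res = res ++ ks.filter (fun k => decide (1 < d.getD k 0)) := by
  induction ks with
  | nil => intro res; simp [pvKeyLoop]
  | cons k ks ih =>
      intro res
      by_cases h : 1 < d.getD k 0
      · simp [pvKeyLoop, h, ih]
      · simp [pvKeyLoop, h, ih]

theorem foldl_add_eq_pvG (l : List String) : ∀ a : List String,
    l.foldl PySem.Set.add a = a ++ pvG l a := by
  induction l with
  | nil => intro a; simp [pvG]
  | cons x xs ih =>
      intro a
      by_cases hm : x ∈ a
      · simp [List.foldl_cons, PySem.Set.add, PySem.Set.contains, pvG, hm, ih]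
      · simp [List.foldl_cons, PySem.Set.add, PySem.Set.contains, pvG, hm, ih]

theorem pass1_mem (l : List String) : ∀ (s d : PySem.Set String) (y : String),
    (y ∈ (pvPass1 l (s, d)).2) ↔ (y ∈ d ∨ (y ∈ s ∧ y ∈ l) ∨ 2 ≤ l.count y) := by
  induction l with
  | nil => intro s d y; simp [pvPass1]
  | cons x rest ih =>
      intro s d y
      by_cases hxs : x ∈ s
      · rw [show pvPass1 (x :: rest) (s, d) = pvPass1 rest (s, PySem.Set.add d x) by
              simp [pvPass1, PySem.Set.contains, hxs]]
        rw [ih]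
        by_cases hyx : y = x
        · subst hyx
          simp [PySem.Set.mem_add, hxs]
        · have hxy : ¬ x = y := fun h => hyx h.symm
          simp [PySem.Set.mem_add, hyx, hxy]
      · rw [show pvPass1 (x :: rest) (s, d) = pvPass1 rest (PySem.Set.add s x, d) by
              simp [pvPass1, PySem.Set.contains, hxs]]
        rw [ih]
        by_cases hyx : y = x
        · subst hyx
          have hc : List.count y (y :: rest) = List.count y rest + 1 := by
            simp
          have hmem : y ∈ PySem.Set.add s y := by simp [PySem.Set.mem_add]
          constructor
          · rintro (hd | ⟨_, hr⟩ | hcnt)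
            · exact Or.inl hd
            · refine Or.inr (Or.inr ?_); rw [hc]
              have := List.count_pos_iff.mpr hr; omega
            · refine Or.inr (Or.inr ?_); rw [hc]; omega
          · rintro (hd | ⟨hs', _⟩ | hcnt)
            · exact Or.inl hd
            · exact absurd hs' hxs
            · rw [hc] at hcnt
              exact Or.inr (Or.inl ⟨hmem, List.count_pos_iff.mp (by omega)⟩)
        · have hxy : ¬ x = y := fun h => hyx h.symm
          simp [PySem.Set.mem_add, hyx, hxy]

theorem pass2_eq (dups : PySem.Set String) (l : List String) :
    ∀ (res added a' : List String),
    (∀ y, y ∈ dups → (y ∈ added ↔ y ∈ a')) →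
    (pvPass2 dups l (res, added)).1 = res ++ (pvG l a').filter (fun y => decide (y ∈ dups)) := by
  induction l with
  | nil => intro res added a' _; simp [pvPass2, pvG]
  | cons x rest ih =>
      intro res added a' hcong
      by_cases hx : x ∈ dups
      · by_cases ha : x ∈ added
        · have ha' : x ∈ a' := (hcong x hx).mp ha
          rw [show pvPass2 dups (x :: rest) (res, added) = pvPass2 dups rest (res, added) by
                simp [pvPass2, PySem.Set.contains, ha]]
          rw [ih res added a' hcong]
          simp [pvG, ha']
        · have ha' : x ∉ a' := fun h => ha ((hcong x hx).mpr h)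
          rw [show pvPass2 dups (x :: rest) (res, added)
                = pvPass2 dups rest (res ++ [x], PySem.Set.add added x) by
                simp [pvPass2, PySem.Set.contains, hx, ha]]
          rw [ih (res ++ [x]) (PySem.Set.add added x) (a' ++ [x]) ?_]
          · simp [pvG, ha', hx]
          · intro y hy
            simp [PySem.Set.mem_add, hcong y hy]
      · rw [show pvPass2 dups (x :: rest) (res, added) = pvPass2 dups rest (res, added) by
              simp [pvPass2, PySem.Set.contains, hx]]
        by_cases ha' : x ∈ a'
        · rw [ih res added a' hcong]; simp [pvG, ha']
        · rw [ih res added (a' ++ [x]) ?_]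
          · simp [pvG, ha', hx]
          · intro y hy
            have hyx : y ≠ x := fun h => hx (h ▸ hy)
            simp [hcong y hy, hyx]

theorem dupA_eq (l1 : List String) :
    duplicate_strings l1 = (pvG l1 []).filter (fun k => decide (2 ≤ l1.count k)) := by
  have hbuild : build_dict_for_string_list l1 = PySem.Dict.counter l1 := by
    rw [build_dict_for_string_list, pvBuildLoop_eq,
        PySem.Dict.foldl_insert_getD_add_one_eq_counter]
  rw [duplicate_strings]
  simp only [hbuild]
  rw [pvKeyLoop_eq, PySem.Dict.keys_counter, List.nil_append]
  have hof : PySem.Set.ofList l1 = pvG l1 [] := by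
    rw [PySem.Set.ofList_eq_foldl, foldl_add_eq_pvG, List.nil_append]
  rw [hof]
  congr 1
  funext k
  rw [PySem.Dict.getD_counter]
  simp only [decide_eq_decide]
  omega

theorem dupB_eq (l1 : List String) :
    duplicate_strings_alt l1 = (pvG l1 []).filter (fun k => decide (2 ≤ l1.count k)) := by
  rw [duplicate_strings_alt]
  rw [pass2_eq _ _ [] PySem.Set.empty [] (by intro y _; rfl)]
  rw [List.nil_append]
  congr 1
  funext k
  have hmem := pass1_mem l1 PySem.Set.empty PySem.Set.empty k
  simp only [PySem.Set.empty, List.not_mem_nil, false_and, false_or] at hmem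
  simp only [decide_eq_decide]
  exact hmem

-- ===== VERDICT (by name: the statement is the Claim_ definition above) =====
theorem duplicate_strings_spec : Claim_equal_duplicate_strings := by
  intro l1 _
  unfold Spec_duplicate_strings
  rw [dupA_eq, dupB_eq]
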